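-- pv_equiv track=rewrite | github.com/Levigin/Code_wars_solutions | 6kyu/Reach Me and Sum my Digits.py | sumDig_nthTerm
-- ===== SOURCE A (Python) =====
-- def sumDig_nthTerm(initVal, patternL, nthTerm):
--     n = nthTerm - 1
--     curr_value = n // len(patternL)
--     limit = n % len(patternL)
--     sum_pattern = sum(patternL) * curr_value
--     curr_res = sum_pattern + initVal
--
--     for i in range(limit):
--         curr_res += patternL[i]
--
--     list_digit = [int(j) for j in list(str(curr_res))]
--
--     return sum(list_digit)
-- ===== SOURCE B (Python) =====
-- def sumDig_nthTerm(initVal, patternL, nthTerm):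
--     m = len(patternL)
--     n = nthTerm - 1
--     v = initVal
--     for i, p in enumerate(patternL):
--         v += p * ((n - i + m - 1) // m)
--     s = 0
--     while v > 0:
--         s += v % 10
--         v //= 10
--     return s
-- ===== Notes on version B (the rewrite author's own statement) =====
-- stated objective: alternative
-- what changed: B drops A's closed-form computation (whole-cycle quotient times pattern total plus a partial-prefix loop) and instead makes one pass over the pattern, multiplying each element by its own occurrence count obtained from a per-element ceiling division (n - i + m - 1) // m, and sums the digits arithmetically with a divmod-by-10 loop instead of A's str() conversion.
import Mathlib
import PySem

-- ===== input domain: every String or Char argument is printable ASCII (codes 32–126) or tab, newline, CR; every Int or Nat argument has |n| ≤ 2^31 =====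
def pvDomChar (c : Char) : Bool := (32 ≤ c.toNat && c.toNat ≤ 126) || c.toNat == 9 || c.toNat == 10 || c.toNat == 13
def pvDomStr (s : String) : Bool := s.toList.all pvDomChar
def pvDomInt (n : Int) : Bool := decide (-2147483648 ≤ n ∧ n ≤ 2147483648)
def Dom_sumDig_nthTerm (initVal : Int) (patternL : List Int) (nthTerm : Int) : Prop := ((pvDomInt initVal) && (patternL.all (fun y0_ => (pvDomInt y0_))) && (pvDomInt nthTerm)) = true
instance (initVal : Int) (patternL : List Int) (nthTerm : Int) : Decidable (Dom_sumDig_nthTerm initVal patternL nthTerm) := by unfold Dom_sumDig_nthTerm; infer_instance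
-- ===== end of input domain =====

-- B counts each pattern element's number of occurrences with one ceiling division per element
-- (no quotient/remainder of the step count, no pattern total, no prefix loop) and sums digits
-- arithmetically instead of via str() (objective: alternative).

-- ===== PORT A =====
def sumDig_nthTerm (initVal : Int) (patternL : List Int) (nthTerm : Int) : Int :=
  let n := nthTerm - 1
  let curr_value := PySem.Int.floordiv n (patternL.length : Int)
  let limit := PySem.Int.mod n (patternL.length : Int)
  let sum_pattern := patternL.sum * curr_value
  let curr_res0 := sum_pattern + initVal
  let curr_res :=
    (PySem.List.pyRange 0 limit 1).foldl
      (fun acc i => acc + PySem.List.pyGetD patternL i 0) curr_res0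
  let list_digit := (PySem.Int.toChars curr_res).map (fun j => (PySem.Int.ofChars? [j]).getD 0)
  list_digit.sum

-- ===== PORT B =====
-- the 'while v > 0: s += v % 10; v //= 10' loop of Source B
def pvDigitLoop (v s : Int) : Int :=
  if _h : 0 < v then
    pvDigitLoop (PySem.Int.floordiv v 10) (s + PySem.Int.mod v 10)
  else s
termination_by v.toNat
decreasing_by
  rw [PySem.Int.floordiv_eq_ediv_of_pos (by norm_num : (0:Int) < 10)]
  omega

def sumDig_nthTerm_alt (initVal : Int) (patternL : List Int) (nthTerm : Int) : Int :=
  let m := (patternL.length : Int)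
  let n := nthTerm - 1
  let v :=
    (PySem.List.enumerate patternL 0).foldl
      (fun acc ip => acc + ip.2 * PySem.Int.floordiv (n - ip.1 + m - 1) m) initVal
  pvDigitLoop v 0

-- ===== PRECONDITION & SPEC =====
-- the value A accumulates before the digit sum, as a closed arithmetic formula on the inputs
def pvAccVal (initVal : Int) (patternL : List Int) (nthTerm : Int) : Int :=
  initVal + patternL.sum * PySem.Int.floordiv (nthTerm - 1) (patternL.length : Int)
    + (PySem.List.slice patternL none (some (PySem.Int.mod (nthTerm - 1) (patternL.length : Int)))).sum

-- Pre_ excludes exactly the inputs on which A raises: empty patternL (ZeroDivisionError) and a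
-- negative accumulated value (int('-') raises ValueError in A's digit-sum step).
def Pre_sumDig_nthTerm (initVal : Int) (patternL : List Int) (nthTerm : Int) : Prop :=
  patternL ≠ [] ∧ 0 ≤ pvAccVal initVal patternL nthTerm
instance (initVal : Int) (patternL : List Int) (nthTerm : Int) : Decidable (Pre_sumDig_nthTerm initVal patternL nthTerm) := by unfold Pre_sumDig_nthTerm; infer_instance

def pvWitness_sumDig_nthTerm : Int × List Int × Int := (5, [1, 2, 3], 7)

def Spec_sumDig_nthTerm (initVal : Int) (patternL : List Int) (nthTerm : Int) (out : Int) : Prop := out = sumDig_nthTerm_alt initVal patternL nthTerm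
instance (initVal : Int) (patternL : List Int) (nthTerm : Int) (out : Int) : Decidable (Spec_sumDig_nthTerm initVal patternL nthTerm out) := by unfold Spec_sumDig_nthTerm; infer_instance

-- ===== CLAIM (what is proved, stated in full; the proofs are below) =====
def Claim_equal_sumDig_nthTerm : Prop := ∀ (initVal : Int) (patternL : List Int) (nthTerm : Int), Dom_sumDig_nthTerm initVal patternL nthTerm → Pre_sumDig_nthTerm initVal patternL nthTerm → Spec_sumDig_nthTerm initVal patternL nthTerm (sumDig_nthTerm initVal patternL nthTerm)

-- ===== LEMMAS AND PROOFS =====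

-- A's prefix loop: fold over range(m) reading patternL[i] is the sum of the first m elements
theorem pv_fold_take (xs : List Int) : ∀ (m : Nat), m ≤ xs.length → ∀ c : Int,
    (PySem.List.pyRange 0 (m : Int) 1).foldl
        (fun acc i => acc + PySem.List.pyGetD xs i 0) c
      = c + (xs.take m).sum := by
  intro m
  induction m with
  | zero => intro _ c; simp [PySem.List.pyRange_one_eq_nil]
  | succ m IH =>
    intro hm c
    have hcast : ((m + 1 : Nat) : Int) = (m : Int) + 1 := by push_cast; ring
    rw [hcast, PySem.List.pyRange_one_succ_right (by positivity), List.foldl_append,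
      IH (by omega) c]
    have hmlt : m < xs.length := by omega
    have hget : PySem.List.pyGetD xs (m : Int) 0 = xs[m] := by
      simp [PySem.List.pyGetD, PySem.List.pyGet?, PySem.List.pyIdx?, hmlt]
    have htake : xs.take (m + 1) = xs.take m ++ [xs[m]] := by
      rw [List.take_add_one]
      simp [List.getElem?_eq_getElem hmlt]
    rw [List.foldl_cons, List.foldl_nil, hget, htake, List.sum_append, List.sum_cons,
      List.sum_nil]
    ring

-- B's per-element occurrence count: the ceiling division equals whole cycles plus one iff i < r
theorem pv_count_eq (n m q r j : Int) (hm : 0 < m) (hn : n = m * q + r)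
    (hr0 : 0 ≤ r) (hrm : r < m) (hj0 : 0 ≤ j) (hjm : j < m) :
    PySem.Int.floordiv (n - j + m - 1) m = q + (if j < r then 1 else 0) := by
  rw [PySem.Int.floordiv_eq_ediv_of_pos hm]
  have h1 : n - j + m - 1 = (r - j - 1 + m) + m * q := by rw [hn]; ring
  rw [h1, Int.add_mul_ediv_left _ _ (ne_of_gt hm)]
  by_cases h : j < r
  · have h2 : r - j - 1 + m = (r - j - 1) + m * 1 := by ring
    rw [h2, Int.add_mul_ediv_left _ _ (ne_of_gt hm),
      Int.ediv_eq_zero_of_lt (by omega) (by omega), if_pos h]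
    ring
  · rw [Int.ediv_eq_zero_of_lt (by omega) (by omega), if_neg h]
    ring

-- B's enumerate pass: summed per-element counted contributions = whole cycles + a prefix
theorem pv_contrib (n m q r : Int) (hm : 0 < m) (hn : n = m * q + r)
    (hr0 : 0 ≤ r) (hrm : r < m) :
    ∀ (xs : List Int) (j : Int), 0 ≤ j → j + xs.length ≤ m →
    ((PySem.List.enumerate xs j).map
        (fun ip => ip.2 * PySem.Int.floordiv (n - ip.1 + m - 1) m)).sum
      = xs.sum * q + (xs.take (r - j).toNat).sum := by
  intro xs
  induction xs with
  | nil => intro j _ _; simp [PySem.List.enumerate]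
  | cons x tl IH =>
    intro j hj hjm
    simp only [List.length_cons] at hjm
    push_cast at hjm
    have hjm' : j < m := by omega
    rw [PySem.List.enumerate_cons, List.map_cons, List.sum_cons,
      IH (j + 1) (by omega) (by omega),
      pv_count_eq n m q r j hm hn hr0 hrm hj hjm']
    by_cases h : j < r
    · have h1 : (r - j).toNat = (r - (j + 1)).toNat + 1 := by omega
      have h2 : (x :: tl).take ((r - (j + 1)).toNat + 1)
          = x :: tl.take ((r - (j + 1)).toNat) := rfl
      rw [h1, List.sum_cons, h2, List.sum_cons, if_pos h]
      ring
    · have h1 : (r - j).toNat = 0 := by omega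
      have h2 : (r - (j + 1)).toNat = 0 := by omega
      rw [h1, h2, if_neg h, List.sum_cons]
      simp
      ring

-- digit sum of a natural number, arithmetically
def pvNatDigSum : Nat → Nat
  | 0 => 0
  | (n + 1) => (n + 1) % 10 + pvNatDigSum ((n + 1) / 10)
decreasing_by exact Nat.div_lt_self (Nat.succ_pos _) (by norm_num)

theorem pvNatDigSum_eq (n : Nat) :
    pvNatDigSum n = if n = 0 then 0 else n % 10 + pvNatDigSum (n / 10) := by
  cases n <;> simp [pvNatDigSum]

theorem pv_dval_digitChar (d : Nat) (h : d < 10) :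
    (PySem.Int.ofChars? [Nat.digitChar d]).getD 0 = (d : Int) := by
  interval_cases d <;> decide

theorem pv_core_sum : ∀ (f n : Nat) (l : List Char), n < f →
    ((Nat.toDigitsCore 10 f n l).map (fun j => (PySem.Int.ofChars? [j]).getD 0)).sum
      = (pvNatDigSum n : Int) + (l.map (fun j => (PySem.Int.ofChars? [j]).getD 0)).sum := by
  intro f
  induction f with
  | zero => intro n l h; omega
  | succ f IH =>
    intro n l h
    rw [Nat.toDigitsCore]
    by_cases hz : n / 10 = 0
    · rw [if_pos hz]
      have hns : pvNatDigSum n = n % 10 := by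
        rw [pvNatDigSum_eq]
        by_cases h0 : n = 0
        · simp [h0]
        · simp [h0, hz, pvNatDigSum]
      simp only [List.map_cons, List.sum_cons,
        pv_dval_digitChar (n % 10) (Nat.mod_lt _ (by norm_num))]
      rw [hns]
    · rw [if_neg hz]
      have hn0 : n ≠ 0 := by intro h0; exact hz (by simp [h0])
      have hlt : n / 10 < f := by
        have := Nat.div_lt_self (Nat.pos_of_ne_zero hn0) (by norm_num : 1 < 10)
        omega
      rw [IH (n / 10) _ hlt]
      simp only [List.map_cons, List.sum_cons,
        pv_dval_digitChar (n % 10) (Nat.mod_lt _ (by norm_num))]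
      conv_rhs => rw [pvNatDigSum_eq]
      rw [if_neg hn0]
      push_cast; ring

theorem pv_toDigits_sum (m : Nat) :
    ((Nat.toDigits 10 m).map (fun j => (PySem.Int.ofChars? [j]).getD 0)).sum
      = (pvNatDigSum m : Int) := by
  have := pv_core_sum (m + 1) m [] (Nat.lt_succ_self m)
  simpa [Nat.toDigits] using this

theorem pvDigitLoop_eq (k : Nat) : ∀ (v s : Int), 0 ≤ v → v.toNat = k →
    pvDigitLoop v s = s + (pvNatDigSum k : Int) := by
  induction k using Nat.strong_induction_on with
  | _ k IH =>
    intro v s hv hk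
    rw [pvDigitLoop]
    have h10 : PySem.Int.floordiv v 10 = v / 10 :=
      PySem.Int.floordiv_eq_ediv_of_pos (by norm_num)
    have hm : PySem.Int.mod v 10 = v % 10 :=
      PySem.Int.mod_eq_emod_of_pos (by norm_num)
    split_ifs with h
    · have hklt : (v / 10).toNat < k := by omega
      rw [h10, hm, IH (v / 10).toNat hklt (v / 10) _ (by omega) rfl]
      have hkk : pvNatDigSum k = k % 10 + pvNatDigSum (k / 10) := by
        rw [pvNatDigSum_eq, if_neg (by omega : k ≠ 0)]
      have h1 : (v / 10).toNat = k / 10 := by omega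
      have h2 : v % 10 = ((k % 10 : Nat) : Int) := by omega
      rw [h1, h2, hkk]; push_cast; ring
    · have : k = 0 := by omega
      simp [this, pvNatDigSum]

-- ===== VERDICT (by name: the statement is the Claim_ definition above) =====
theorem sumDig_nthTerm_spec : Claim_equal_sumDig_nthTerm := by
  intro initVal patternL nthTerm _hDom hPre
  obtain ⟨hne, hnn⟩ := hPre
  unfold Spec_sumDig_nthTerm sumDig_nthTerm sumDig_nthTerm_alt
  have hL : 0 < patternL.length := List.length_pos_of_ne_nil hne
  have hLi : (0 : Int) < (patternL.length : Int) := by exact_mod_cast hL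
  set n := nthTerm - 1 with hndef
  set L := patternL.length with hLdef
  set q := PySem.Int.floordiv n (L : Int) with hqdef
  set r := PySem.Int.mod n (L : Int) with hrdef
  have hq : q = n / (L : Int) := PySem.Int.floordiv_eq_ediv_of_pos hLi
  have hr : r = n % (L : Int) := PySem.Int.mod_eq_emod_of_pos hLi
  have hn : n = (L : Int) * q + r := by
    rw [hq, hr]; exact (Int.mul_ediv_add_emod n (L : Int)).symm
  have hr0 : 0 ≤ r := by rw [hr]; exact Int.emod_nonneg _ (ne_of_gt hLi)
  have hrm : r < (L : Int) := by rw [hr]; exact Int.emod_lt_of_pos _ hLi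
  have hrcast : ((r.toNat : Nat) : Int) = r := Int.toNat_of_nonneg hr0
  -- A's accumulated value
  have hfoldA :
      (PySem.List.pyRange 0 r 1).foldl
          (fun acc i => acc + PySem.List.pyGetD patternL i 0)
          (patternL.sum * q + initVal)
        = patternL.sum * q + initVal + (patternL.take r.toNat).sum := by
    rw [← hrcast]; exact pv_fold_take patternL r.toNat (by omega) _
  -- B's accumulated value
  have hfoldB :
      (PySem.List.enumerate patternL 0).foldl
          (fun acc ip => acc + ip.2 * PySem.Int.floordiv (n - ip.1 + (L : Int) - 1) (L : Int))
          initVal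
        = initVal + patternL.sum * q + (patternL.take r.toNat).sum := by
    rw [PySem.List.foldl_add]
    rw [pv_contrib n (L : Int) q r hLi hn hr0 hrm patternL 0 le_rfl (by omega)]
    rw [sub_zero]
    ring
  simp only []
  rw [hfoldA, hfoldB]
  -- the common accumulated value, nonnegative by Pre_
  have hacc : patternL.sum * q + initVal + (patternL.take r.toNat).sum
      = initVal + patternL.sum * q + (patternL.take r.toNat).sum := by ring
  rw [hacc]
  set v := initVal + patternL.sum * q + (patternL.take r.toNat).sum with hvdef
  have hv0 : 0 ≤ v := by
    have hslice : PySem.List.slice patternL none (some r) = patternL.take r.toNat :=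
      PySem.List.slice_to _ hr0
    have : pvAccVal initVal patternL nthTerm = v := by
      unfold pvAccVal
      rw [← hndef, ← hLdef, ← hqdef, ← hrdef, hslice]
    omega
  -- digit sum: string-based (A) = arithmetic (B)
  have hchars : PySem.Int.toChars v = Nat.toDigits 10 v.toNat := by
    unfold PySem.Int.toChars
    rw [if_neg (by omega)]
  rw [hchars, pv_toDigits_sum, pvDigitLoop_eq v.toNat v 0 hv0 rfl]
  ring
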